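-- pv_equiv track=rewrite | github.com/darekbx/CARI | cari-client/sqliteresource.py | create_dot_row
-- ===== SOURCE A (Python) =====
-- def create_dot_row(columns, columns_width):
--     dot_row = ""
--     for index, column in enumerate(columns):
--         column_width = columns_width[index]
--         data = "| {0: <{width}} ".format("", width=column_width)
--         for i in range(0, len(data)):
--             dot_row += "-"
--     dot_row += "-"
--     return dot_row
-- ===== SOURCE B (Python) =====
-- def create_dot_row(columns, columns_width):
--     total = 1
--     for i in range(len(columns)):
--         total += columns_width[i] + 3
--     return "-" * total
-- ===== Notes on version B (the rewrite author's own statement) =====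
-- stated objective: faster
-- what changed: B replaces the nested char-by-char dash-appending loops with a single arithmetic pass accumulating the total length (width+3 per column, plus 1) followed by one string multiplication.
import Mathlib
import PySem

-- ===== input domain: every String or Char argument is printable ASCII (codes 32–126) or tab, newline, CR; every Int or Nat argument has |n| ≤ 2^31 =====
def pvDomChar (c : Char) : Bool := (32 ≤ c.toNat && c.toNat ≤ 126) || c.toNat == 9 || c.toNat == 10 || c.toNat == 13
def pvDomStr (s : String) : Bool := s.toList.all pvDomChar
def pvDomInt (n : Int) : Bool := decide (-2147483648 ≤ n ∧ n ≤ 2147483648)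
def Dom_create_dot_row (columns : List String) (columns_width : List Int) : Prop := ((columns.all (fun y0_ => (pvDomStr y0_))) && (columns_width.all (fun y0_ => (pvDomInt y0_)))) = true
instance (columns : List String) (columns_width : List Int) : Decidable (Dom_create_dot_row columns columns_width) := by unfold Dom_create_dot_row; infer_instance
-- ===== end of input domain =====

-- B replaces the nested dash-appending loops with one arithmetic pass over the column
-- indices plus a single string multiplication; equivalence is proved on Pre_ (widths
-- present and non-negative), where A returns normally.

-- ===== PORT A =====
def create_dot_row (columns : List String) (columns_width : List Int) : String :=
  let dot_row : List Char :=
    (PySem.List.enumerate columns 0).foldl (fun dot_row p =>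
      let column_width := PySem.List.pyGetD columns_width p.1 0
      -- "| {0: <{width}} ".format("", width=w) is exactly "| " ++ " "*w ++ " " for 0 ≤ w (Pre_)
      let data : List Char := ('|' :: ' ' :: List.replicate column_width.toNat ' ') ++ [' ']
      (PySem.List.pyRange 0 (data.length : Int) 1).foldl (fun s _ => s ++ ['-']) dot_row) []
  String.ofList (dot_row ++ ['-'])

-- ===== PORT B =====
def create_dot_row_alt (columns : List String) (columns_width : List Int) : String :=
  let total : Int := (PySem.List.pyRange 0 (columns.length : Int) 1).foldl
      (fun total i => total + PySem.List.pyGetD columns_width i 0 + 3) 1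
  String.ofList (List.replicate total.toNat '-')

-- ===== PRECONDITION & SPEC =====
-- Pre_ excludes the inputs on which A raises: an IndexError when columns_width is
-- shorter than columns, and a ValueError from the format specifier when an indexed
-- width is negative.
def Pre_create_dot_row (columns : List String) (columns_width : List Int) : Prop :=
  columns.length ≤ columns_width.length ∧
  ∀ w ∈ columns_width.take columns.length, 0 ≤ w
instance (columns : List String) (columns_width : List Int) : Decidable (Pre_create_dot_row columns columns_width) := by unfold Pre_create_dot_row; infer_instance
def pvWitness_create_dot_row : List String × List Int := (["id", "name"], [2, 4])

def Spec_create_dot_row (columns : List String) (columns_width : List Int) (out : String) : Prop := out = create_dot_row_alt columns columns_width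
instance (columns : List String) (columns_width : List Int) (out : String) : Decidable (Spec_create_dot_row columns columns_width out) := by unfold Spec_create_dot_row; infer_instance

-- ===== CLAIM (what is proved, stated in full; the proofs are below) =====
def Claim_equal_create_dot_row : Prop := ∀ (columns : List String) (columns_width : List Int), Dom_create_dot_row columns columns_width → Pre_create_dot_row columns columns_width → Spec_create_dot_row columns columns_width (create_dot_row columns columns_width)

-- ===== LEMMAS AND PROOFS =====

-- the inner loop of A appends one dash per element of the range
theorem pv_dash_loop (t : List Int) (acc : List Char) :
    t.foldl (fun s _ => s ++ ['-']) acc = acc ++ List.replicate t.length '-' := by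
  induction t generalizing acc with
  | nil => simp
  | cons h t ih => simp [ih, List.replicate_succ]

theorem pv_foldl_shift (l : List Int) (a b : Int) :
    l.foldl (fun t w => t + w + 3) (a + b) = a + l.foldl (fun t w => t + w + 3) b := by
  induction l generalizing b with
  | nil => simp
  | cons h t ih =>
    simp only [List.foldl_cons]
    rw [show a + b + h + 3 = a + (b + h + 3) by ring, ih]

theorem pv_foldl_nonneg (l : List Int) (a : Int) (hl : ∀ w ∈ l, 0 ≤ w) (ha : 0 ≤ a) :
    0 ≤ l.foldl (fun t w => t + w + 3) a := by
  induction l generalizing a with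
  | nil => simpa
  | cons h t ih =>
    have hh := hl h (List.mem_cons_self)
    exact ih (a + h + 3) (fun w hw => hl w (List.mem_cons_of_mem _ hw)) (by omega)

theorem pv_main (l : List Int) (a : Int) (hl : ∀ w ∈ l, 0 ≤ w) (ha : 0 ≤ a) :
    l.foldl (fun s w => s ++ List.replicate (w.toNat + 3) '-') (List.replicate a.toNat '-')
      = List.replicate (l.foldl (fun t w => t + w + 3) a).toNat '-' := by
  induction l generalizing a with
  | nil => simp
  | cons w t ih =>
    have hw := hl w (List.mem_cons_self)
    simp only [List.foldl_cons]
    rw [← List.replicate_add, show a.toNat + (w.toNat + 3) = (a + w + 3).toNat by omega,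
      ih (a + w + 3) (fun x hx => hl x (List.mem_cons_of_mem _ hx)) (by omega)]

theorem create_dot_row_spec_aux (columns : List String) (columns_width : List Int)
    (hpre : Pre_create_dot_row columns columns_width) :
    create_dot_row columns columns_width = create_dot_row_alt columns columns_width := by
  obtain ⟨hlen, hpos⟩ := hpre
  set n := columns.length with hn
  set l := columns_width.take n with hldef
  have hllen : l.length = n := by simp [hldef, hlen]
  have hget : ∀ j ∈ PySem.List.pyRange 0 (n : Int) 1,
      PySem.List.pyGetD columns_width j 0 = PySem.List.pyGetD l j 0 := by
    intro j hj
    rw [PySem.List.mem_pyRange_one] at hj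
    rw [PySem.List.pyGetD_eq_getElem columns_width 0 hj.1 (by omega),
        PySem.List.pyGetD_eq_getElem l 0 hj.1 (by rw [hllen]; exact_mod_cast hj.2)]
    simp [hldef, List.getElem_take]
  have hinner : ∀ (acc : List Char) (j : Int),
      (PySem.List.pyRange 0 ((('|' :: ' ' :: List.replicate (PySem.List.pyGetD columns_width j 0).toNat ' ') ++ [' ']).length : Int) 1).foldl
        (fun s _ => s ++ ['-']) acc
      = acc ++ List.replicate ((PySem.List.pyGetD columns_width j 0).toNat + 3) '-' := by
    intro acc j
    rw [pv_dash_loop]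
    congr 1
    simp [PySem.List.length_pyRange_one]
    omega
  -- the outer loop of A, reduced to a fold over l
  have hfoldA : (PySem.List.pyRange 0 (n : Int) 1).foldl
      (fun dot_row j =>
        (PySem.List.pyRange 0 ((('|' :: ' ' :: List.replicate (PySem.List.pyGetD columns_width j 0).toNat ' ') ++ [' ']).length : Int) 1).foldl
          (fun s _ => s ++ ['-']) dot_row) []
      = l.foldl (fun s w => s ++ List.replicate (w.toNat + 3) '-') [] := by
    calc _ = (PySem.List.pyRange 0 (n : Int) 1).foldl
            (fun dot_row j => dot_row ++ List.replicate ((PySem.List.pyGetD l j 0).toNat + 3) '-') [] := by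
          apply PySem.List.foldl_congr_mem
          intro acc j hj
          rw [hinner acc j, hget j hj]
      _ = _ := by
          have h := PySem.List.foldl_pyRange_zero_pyGetD l 0
              (fun s w => s ++ List.replicate (w.toNat + 3) '-') ([] : List Char)
          simpa [hllen] using h
  -- the loop of B, reduced to a fold over l
  have hfoldB : (PySem.List.pyRange 0 (n : Int) 1).foldl
      (fun total i => total + PySem.List.pyGetD columns_width i 0 + 3) 1
      = 1 + l.foldl (fun t w => t + w + 3) 0 := by
    calc _ = (PySem.List.pyRange 0 (n : Int) 1).foldl
            (fun total i => total + PySem.List.pyGetD l i 0 + 3) 1 := by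
          apply PySem.List.foldl_congr_mem
          intro acc j hj
          rw [hget j hj]
      _ = l.foldl (fun t w => t + w + 3) 1 := by
          have h := PySem.List.foldl_pyRange_zero_pyGetD l 0
              (fun t w => t + w + 3) (1 : Int)
          simpa [hllen] using h
      _ = 1 + l.foldl (fun t w => t + w + 3) 0 := by
          simpa using pv_foldl_shift l 1 0
  have hS := pv_foldl_nonneg l 0 hpos le_rfl
  have hmain := pv_main l 0 hpos le_rfl
  simp only [Int.toNat_zero, List.replicate_zero] at hmain
  unfold create_dot_row create_dot_row_alt
  rw [PySem.List.enumerate_eq_map_pyRange columns ""]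
  simp only [List.foldl_map, PySem.List.len_eq, ← hn]
  rw [hfoldA, hfoldB, hmain]
  congr 1
  have h3 : (1 + l.foldl (fun (t w : Int) => t + w + 3) 0).toNat
      = (l.foldl (fun (t w : Int) => t + w + 3) 0).toNat + 1 := by omega
  rw [h3, List.replicate_succ']

-- ===== VERDICT (by name: the statement is the Claim_ definition above) =====
theorem create_dot_row_spec : Claim_equal_create_dot_row := by
  intro columns columns_width _ hpre
  exact create_dot_row_spec_aux columns columns_width hpre
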